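-- pv_equiv track=rewrite | github.com/scv74502/PS | 백준/Silver/2468. 안전 영역/안전 영역.py | bfs
-- ===== SOURCE A (Python) =====
-- from collections import deque
--
-- mn = [-1, 1, 0, 0]
--
-- mm = [0, 0, -1, 1]
--
-- def bfs(area: list[list[int]], R: int) -> int:
--     cnt = 0
--     N = len(area)
--     visited = [[False for __ in range(N)] for _ in range(N)]
--     dq = deque()
--
--     for i in range(N):
--         for j in range(N):
--             if not visited[i][j] and area[i][j] > R:
--                 cnt += 1
--                 dq.append([i, j])
--                 visited[i][j] = True
--
--                 while dq:
--                     cn, cm = dq.popleft()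
--
--                     for mv in range(4):
--                         nn, nm = cn + mn[mv], cm + mm[mv]
--
--                         if 0 <= nn < N and 0 <= nm < N and not visited[nn][nm]:
--                             visited[nn][nm] = True
--                             if area[nn][nm] > R:
--                                 dq.append([nn, nm])
--
--     return cnt
-- ===== SOURCE B (Python) =====
-- def bfs(area: list[list[int]], R: int) -> int:
--     N = len(area)
--     parent = list(range(N * N))
--     for i in range(N):
--         for j in range(N):
--             if area[i][j] > R:
--                 k = i * N + j
--                 if j + 1 < N and area[i][j + 1] > R:
--                     _union(parent, k, k + 1)
--                 if i + 1 < N and area[i + 1][j] > R: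
--                     _union(parent, k, k + N)
--     return sum(
--         1
--         for i in range(N)
--         for j in range(N)
--         if area[i][j] > R and _find(parent, i * N + j) == i * N + j
--     )
--
--
-- def _find(parent, x):
--     while parent[x] != x:
--         x = parent[x]
--     return x
--
--
-- def _union(parent, a, b):
--     ra, rb = _find(parent, a), _find(parent, b)
--     if ra < rb:
--         parent[rb] = ra
--     elif rb < ra:
--         parent[ra] = rb
-- ===== Notes on version B (the rewrite author's own statement) =====
-- stated objective: alternative
-- what changed: A's BFS flood fill (deque worklist over an N*N visited matrix, one search per unseen component) is replaced by union-find over flat cell indices: one pass unions each above-threshold cell with its right/down above-threshold neighbours (attaching the larger root under the smaller), then the components are counted as the cells that are their own root; no search or visited structure exists in B.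
import Mathlib
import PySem

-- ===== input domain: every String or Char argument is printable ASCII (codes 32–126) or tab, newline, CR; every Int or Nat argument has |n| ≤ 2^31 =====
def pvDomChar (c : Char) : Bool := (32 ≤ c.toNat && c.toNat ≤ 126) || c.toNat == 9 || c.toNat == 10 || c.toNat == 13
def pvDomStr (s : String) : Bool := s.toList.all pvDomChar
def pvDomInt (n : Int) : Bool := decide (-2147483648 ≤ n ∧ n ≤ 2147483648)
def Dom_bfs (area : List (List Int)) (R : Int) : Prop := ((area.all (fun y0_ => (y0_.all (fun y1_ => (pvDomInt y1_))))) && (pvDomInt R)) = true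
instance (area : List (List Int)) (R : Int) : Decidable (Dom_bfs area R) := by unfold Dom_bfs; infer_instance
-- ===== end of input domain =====

set_option maxHeartbeats 1000000

-- B replaces A's BFS flood fill (deque worklist, N×N visited matrix, one search per component) by
-- union-find over flat cell indices: one pass unions each above-threshold cell with its right/down
-- above-threshold neighbours (larger root attached under the smaller), then the cells that are
-- their own root are counted. No search or visited structure exists in B. Objective: alternative.
-- B mutates only a list it creates itself; A mutates nothing it is given.

-- shared read helper: area[i][j] (reads are in range on every input admitted by Pre_bfs)
def pvAt (area : List (List Int)) (i j : Int) : Int :=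
  ((PySem.List.pyGet? area i).bind (fun r => PySem.List.pyGet? r j)).getD 0

-- ===== PORT A =====
-- mn / mm: the two constant move tables of the module
def mnA : List Int := [-1, 1, 0, 0]
def mmA : List Int := [0, 0, -1, 1]

-- visited[i][j] (indices are produced nonnegative and in range by A's guards)
def pvVGet (v : List (List Bool)) (i j : Int) : Bool :=
  ((PySem.List.pyGet? v i).bind (fun r => PySem.List.pyGet? r j)).getD false

-- visited[i][j] = True
def pvVSet (v : List (List Bool)) (i j : Int) : List (List Bool) :=
  v.set i.toNat ((v.getD i.toNat []).set j.toNat true)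

-- body of 'for mv in range(4)': nn, nm = cn + mn[mv], cm + mm[mv]; state is (dq, visited)
def pvStepA (area : List (List Int)) (R N cn cm : Int)
    (s : List (Int × Int) × List (List Bool)) (d : Int × Int) :
    List (Int × Int) × List (List Bool) :=
  let nn := cn + d.1
  let nm := cm + d.2
  if 0 ≤ nn ∧ nn < N ∧ 0 ≤ nm ∧ nm < N ∧ pvVGet s.2 nn nm = false then
    let v' := pvVSet s.2 nn nm
    if pvAt area nn nm > R then (s.1 ++ [(nn, nm)], v') else (s.1, v')
  else s

-- 'while dq:' — popleft from the front, appends go to the back; fuel N*N is enough (proved below)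
def pvLoopA (area : List (List Int)) (R N : Int) :
    Nat → List (Int × Int) → List (List Bool) → List (List Bool)
  | 0, _, v => v
  | _ + 1, [], v => v
  | f + 1, c :: rest, v =>
    let s := (mnA.zip mmA).foldl (pvStepA area R N c.1 c.2) (rest, v)
    pvLoopA area R N f s.1 s.2

-- body of 'for j in range(N)': state is (cnt, visited)
def pvInnerA (area : List (List Int)) (R N i : Int)
    (st : Int × List (List Bool)) (j : Int) : Int × List (List Bool) :=
  if pvVGet st.2 i j = false ∧ pvAt area i j > R then
    (st.1 + 1, pvLoopA area R N (N.toNat * N.toNat) [(i, j)] (pvVSet st.2 i j))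
  else st

def pvOuterA (area : List (List Int)) (R N : Int)
    (st : Int × List (List Bool)) (i : Int) : Int × List (List Bool) :=
  (PySem.List.pyRange 0 N 1).foldl (pvInnerA area R N i) st

def bfs (area : List (List Int)) (R : Int) : Int :=
  ((PySem.List.pyRange 0 (area.length : Int) 1).foldl (pvOuterA area R (area.length : Int))
    (0, List.replicate area.length (List.replicate area.length false))).1

-- ===== PORT B =====
-- _find: 'while parent[x] != x: x = parent[x]'; fuel x+1 suffices because the pass
-- only ever attaches a larger root under a smaller one (parent[y] ≤ y throughout)
def ufFindAux (parent : List Nat) : Nat → Nat → Nat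
  | 0, x => x
  | f + 1, x => if parent.getD x x = x then x else ufFindAux parent f (parent.getD x x)

def ufFind (parent : List Nat) (x : Nat) : Nat := ufFindAux parent (x + 1) x

-- _union: attach the larger root under the smaller
def ufUnion (parent : List Nat) (a b : Nat) : List Nat :=
  let ra := ufFind parent a
  let rb := ufFind parent b
  if ra < rb then parent.set rb ra
  else if rb < ra then parent.set ra rb
  else parent

-- loop body of the union pass for one cell (i, j)
def ufCell (area : List (List Int)) (R : Int) (N : Nat) (par : List Nat) (i j : Nat) : List Nat :=
  if pvAt area (i : Int) (j : Int) > R then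
    let k := i * N + j
    let par1 := if j + 1 < N ∧ pvAt area (i : Int) ((j + 1 : Nat) : Int) > R
      then ufUnion par k (k + 1) else par
    if i + 1 < N ∧ pvAt area ((i + 1 : Nat) : Int) (j : Int) > R
      then ufUnion par1 k (k + N) else par1
  else par

-- parent = list(range(N*N)) followed by the double loop of unions
def ufPass (area : List (List Int)) (R : Int) (N : Nat) : List Nat :=
  (List.range N).foldl
    (fun par i => (List.range N).foldl (fun par j => ufCell area R N par i j) par)
    (List.range (N * N))

def bfs_alt (area : List (List Int)) (R : Int) : Int :=
  let N := area.length
  let parent := ufPass area R N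
  (List.range N).foldl
    (fun (c : Int) (i : Nat) => (List.range N).foldl
      (fun (c : Int) (j : Nat) =>
        if pvAt area (i : Int) (j : Int) > R ∧ ufFind parent (i * N + j) = i * N + j
        then c + 1 else c) c)
    0

-- ===== PRECONDITION & SPEC =====
-- Pre_bfs: every row has at least N = len(area) entries; on shorter rows the Python A (and B)
-- raise IndexError, so exactly those inputs are excluded.
def Pre_bfs (area : List (List Int)) (R : Int) : Prop :=
  ∀ row ∈ area, area.length ≤ row.length
instance (area : List (List Int)) (R : Int) : Decidable (Pre_bfs area R) := by
  unfold Pre_bfs; infer_instance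

def pvWitness_bfs : List (List Int) × Int := ([[1, 3], [2, 0]], 1)

def Spec_bfs (area : List (List Int)) (R : Int) (out : Int) : Prop := out = bfs_alt area R
instance (area : List (List Int)) (R : Int) (out : Int) : Decidable (Spec_bfs area R out) := by
  unfold Spec_bfs; infer_instance

-- ===== CLAIM (what is proved, stated in full; the proofs are below) =====
def Claim_equal_bfs : Prop := ∀ (area : List (List Int)) (R : Int), Dom_bfs area R → Pre_bfs area R → Spec_bfs area R (bfs area R)

-- ===== LEMMAS AND PROOFS =====

-- ---------- abstract layer shared by both sides ----------
def pvInb (N : Int) (p : Int × Int) : Prop := 0 ≤ p.1 ∧ p.1 < N ∧ 0 ≤ p.2 ∧ p.2 < N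

def pvGood (area : List (List Int)) (R N : Int) (p : Int × Int) : Prop :=
  pvInb N p ∧ pvAt area p.1 p.2 > R

def pvNbrs (p : Int × Int) : List (Int × Int) :=
  [(p.1 - 1, p.2), (p.1 + 1, p.2), (p.1, p.2 - 1), (p.1, p.2 + 1)]

def pvMemA (v : List (List Bool)) (p : Int × Int) : Prop := pvVGet v p.1 p.2 = true

def pvShape (N : Int) (v : List (List Bool)) : Prop :=
  v.length = N.toNat ∧ ∀ row ∈ v, row.length = N.toNat

def pvClosed (area : List (List Int)) (R N : Int) (X : Int × Int → Prop) : Prop :=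
  ∀ p, X p → pvGood area R N p → ∀ q ∈ pvNbrs p, pvGood area R N q → X q

def pvAll (N : Int) : List (Int × Int) :=
  (PySem.List.pyRange 0 N 1).flatMap (fun i => (PySem.List.pyRange 0 N 1).map (fun j => (i, j)))

def pvUA (N : Int) (v : List (List Bool)) : Nat :=
  ((pvAll N).filter (fun p => !pvVGet v p.1 p.2)).length

-- adjacency of good cells (the relation A's flood closes under), and its reflexive-transitive closure
def adjP (area : List (List Int)) (R N : Int) (p q : Int × Int) : Prop :=
  pvGood area R N p ∧ pvGood area R N q ∧ q ∈ pvNbrs p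

def ReachP (area : List (List Int)) (R N : Int) : Int × Int → Int × Int → Prop :=
  Relation.ReflTransGen (adjP area R N)

-- flat-index layer used by B: good flat cells and their grid adjacency
def gdF (area : List (List Int)) (R : Int) (N : Nat) (k : Nat) : Prop :=
  k < N * N ∧ pvAt area ((k / N : Nat) : Int) ((k % N : Nat) : Int) > R

def adjF (area : List (List Int)) (R : Int) (N : Nat) (k l : Nat) : Prop :=
  gdF area R N k ∧ gdF area R N l ∧
    (l = k + 1 ∧ k % N + 1 < N ∨ k = l + 1 ∧ l % N + 1 < N ∨ l = k + N ∨ k = l + N)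

def ConnF (area : List (List Int)) (R : Int) (N : Nat) : Nat → Nat → Prop :=
  Relation.ReflTransGen (adjF area R N)

def encI (N : Nat) (p : Int × Int) : Nat := p.1.toNat * N + p.2.toNat

def decF (N : Nat) (k : Nat) : Int × Int := (((k / N : Nat) : Int), ((k % N : Nat) : Int))

lemma pv_mem_all {N : Int} {p : Int × Int} : p ∈ pvAll N ↔ pvInb N p := by
  cases p with
  | mk a b =>
    simp only [pvAll, List.mem_flatMap, List.mem_map, PySem.List.mem_pyRange_one, pvInb,
      Prod.ext_iff]
    constructor
    · rintro ⟨i, hi, j, hj, h1, h2⟩; omega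
    · rintro ⟨h1, h2, h3, h4⟩
      exact ⟨a, ⟨by omega, by omega⟩, ⟨b, ⟨by omega, by omega⟩, rfl, rfl⟩⟩

lemma pv_length_all (N : Int) : (pvAll N).length = N.toNat * N.toNat := by
  simp only [pvAll, List.length_flatMap]
  have h2 : ∀ a ∈ PySem.List.pyRange 0 N 1,
      ((PySem.List.pyRange 0 N 1).map (fun j => (a, j))).length = N.toNat := by
    intro a _; simp [PySem.List.length_pyRange_one]
  rw [List.map_congr_left h2, List.map_const', List.sum_replicate, PySem.List.length_pyRange_one]
  simp [smul_eq_mul]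

lemma pv_nbrs_eq (c : Int × Int) :
    (mnA.zip mmA).map (fun d => (c.1 + d.1, c.2 + d.2)) = pvNbrs c := by
  simp [mnA, mmA, pvNbrs, List.zip, Prod.ext_iff]
  omega

lemma pv_filter_le {α : Type} (l : List α) (pn po : α → Bool)
    (hmono : ∀ a ∈ l, pn a = true → po a = true) :
    (l.filter pn).length ≤ (l.filter po).length := by
  induction l with
  | nil => simp
  | cons a t ih =>
    have hmono' : ∀ b ∈ t, pn b = true → po b = true := fun b hb => hmono b (by simp [hb])
    have iht := ih hmono'
    cases hpn : pn a <;> cases hpo : po a <;> simp [List.filter, hpn, hpo] <;>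
      first
        | omega
        | exact absurd (hmono a (by simp) hpn) (by simp [hpo])

lemma pv_filter_lt {α : Type} (l : List α) (pn po : α → Bool)
    (hmono : ∀ a ∈ l, pn a = true → po a = true) (x : α) (hx : x ∈ l)
    (hox : po x = true) (hnx : pn x = false) :
    (l.filter pn).length < (l.filter po).length := by
  induction l with
  | nil => cases hx
  | cons a t ih =>
    have hmono' : ∀ b ∈ t, pn b = true → po b = true := fun b hb => hmono b (by simp [hb])
    have hle := pv_filter_le t pn po hmono'
    rcases List.mem_cons.1 hx with rfl | hxt
    · simp [List.filter, hox, hnx]; omega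
    · have iht := ih hmono' hxt
      cases hpn : pn a <;> cases hpo : po a <;> simp [List.filter, hpn, hpo] <;>
        first
          | omega
          | exact absurd (hmono a (by simp) hpn) (by simp [hpo])

-- visited-matrix basics
lemma pv_shape_vset {N : Int} {v : List (List Bool)} (h : pvShape N v) (i j : Int) :
    pvShape N (pvVSet v i j) := by
  obtain ⟨hl, hr⟩ := h
  by_cases hi : i.toNat < v.length
  · constructor
    · simp [pvVSet, hl]
    · intro row hrow
      rcases List.mem_or_eq_of_mem_set hrow with hmem | rfl
      · exact hr row hmem
      · rw [List.length_set, List.getD_eq_getElem v [] hi]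
        exact hr _ (List.getElem_mem hi)
  · rw [show pvVSet v i j = v from List.set_eq_of_length_le (by omega)]
    exact ⟨hl, hr⟩

lemma pv_vget_vset_self {N : Int} {v : List (List Bool)} (h : pvShape N v)
    {i j : Int} (hin : pvInb N (i, j)) :
    pvVGet (pvVSet v i j) i j = true := by
  obtain ⟨hl, hr⟩ := h
  obtain ⟨h1, h2, h3, h4⟩ := hin
  simp only at h1 h2 h3 h4
  have hi : i.toNat < v.length := by omega
  have hrow : (v.getD i.toNat []).length = N.toNat := by
    rw [List.getD_eq_getElem v [] hi]; exact hr _ (List.getElem_mem hi)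
  have hj : j.toNat < (v.getD i.toNat []).length := by omega
  simp only [pvVGet, pvVSet]
  rw [PySem.List.pyGet?_of_nonneg _ h1, List.getElem?_set, if_pos rfl, if_pos hi]
  simp only [Option.bind_some]
  rw [PySem.List.pyGet?_of_nonneg _ h3, List.getElem?_set, if_pos rfl, if_pos hj]
  rfl

lemma pv_vget_vset_ne {v : List (List Bool)} {a b i j : Int}
    (ha : 0 ≤ a) (hb : 0 ≤ b) (hi : 0 ≤ i) (hj : 0 ≤ j) (hne : (a, b) ≠ (i, j)) :
    pvVGet (pvVSet v i j) a b = pvVGet v a b := by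
  by_cases hilen : i.toNat < v.length
  · by_cases hai : a = i
    · subst hai
      have hbj : b ≠ j := by
        intro hc; exact hne (by rw [hc])
      simp only [pvVGet, pvVSet]
      rw [PySem.List.pyGet?_of_nonneg _ ha, PySem.List.pyGet?_of_nonneg _ ha, List.getElem?_set]
      rw [if_pos rfl, if_pos hilen]
      have hget : v[a.toNat]? = some (v.getD a.toNat []) := by
        rw [List.getD_eq_getElem v [] hilen]; exact List.getElem?_eq_getElem hilen
      rw [hget]
      simp only [Option.bind_some]
      rw [PySem.List.pyGet?_of_nonneg _ hb, PySem.List.pyGet?_of_nonneg _ hb, List.getElem?_set]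
      rw [if_neg (by omega)]
    · simp only [pvVGet, pvVSet]
      rw [PySem.List.pyGet?_of_nonneg _ ha, PySem.List.pyGet?_of_nonneg _ ha, List.getElem?_set]
      rw [if_neg (by omega)]
  · rw [show pvVSet v i j = v from List.set_eq_of_length_le (by omega)]

lemma pv_vget_replicate (n m : Nat) (i j : Int) :
    pvVGet (List.replicate n (List.replicate m false)) i j = false := by
  simp only [pvVGet]
  cases h1 : PySem.List.pyGet? (List.replicate n (List.replicate m false)) i with
  | none => simp
  | some r =>
    have hr : r = List.replicate m false :=
      List.eq_of_mem_replicate (PySem.List.mem_of_pyGet?_eq_some _ h1)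
    subst hr
    cases h2 : PySem.List.pyGet? (List.replicate m false) j with
    | none => simp [h2]
    | some x =>
      have hx : x = false := List.eq_of_mem_replicate (PySem.List.mem_of_pyGet?_eq_some _ h2)
      simp [h2, hx]

-- membership after a mark, at in-bounds cells
lemma pv_memA_vset {N : Int} {v : List (List Bool)} (h : pvShape N v)
    {q : Int × Int} (hq : pvInb N q) {p : Int × Int} (hp : pvInb N p) :
    pvMemA (pvVSet v q.1 q.2) p ↔ (p = q ∨ pvMemA v p) := by
  by_cases hpq : p = q
  · subst hpq
    simp only [pvMemA]
    rw [pv_vget_vset_self h (by exact hq)]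
    simp
  · have hne : (p.1, p.2) ≠ (q.1, q.2) := by
      intro hc
      exact hpq (Prod.ext (congrArg Prod.fst hc) (congrArg Prod.snd hc))
    simp only [pvMemA]
    rw [pv_vget_vset_ne hp.1 hp.2.2.1 hq.1 hq.2.2.1 hne]
    simp [hpq]

-- the count of unvisited cells decreases strictly when an unvisited in-bounds cell is marked
lemma pv_uA_mark {N : Int} {v : List (List Bool)} (h : pvShape N v)
    {q : Int × Int} (hq : pvInb N q) (hnew : pvVGet v q.1 q.2 = false) :
    pvUA N (pvVSet v q.1 q.2) < pvUA N v := by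
  unfold pvUA
  apply pv_filter_lt _ _ _ ?_ q (pv_mem_all.2 hq) (by simp [hnew]) ?_
  · intro a ha hpn
    have hain : pvInb N a := pv_mem_all.1 ha
    by_cases haq : a = q
    · subst haq
      have hself : pvVGet (pvVSet v a.1 a.2) a.1 a.2 = true := pv_vget_vset_self h hain
      simp only [Bool.not_eq_true'] at hpn
      simp [hself] at hpn
    · have hne : (a.1, a.2) ≠ (q.1, q.2) := by
        intro hc; exact haq (Prod.ext (congrArg Prod.fst hc) (congrArg Prod.snd hc))
      rw [pv_vget_vset_ne hain.1 hain.2.2.1 hq.1 hq.2.2.1 hne] at hpn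
      exact hpn
  · have hself : pvVGet (pvVSet v q.1 q.2) q.1 q.2 = true := pv_vget_vset_self h hq
    simp [hself]

-- ---------- the A-side neighbour fold ----------
lemma pv_stepA_cases (area : List (List Int)) (R N cn cm : Int)
    (W : List (Int × Int)) (v : List (List Bool)) (d : Int × Int) :
    (pvStepA area R N cn cm (W, v) d = (W, v) ∧
      (pvInb N (cn + d.1, cm + d.2) → pvMemA v (cn + d.1, cm + d.2))) ∨
    (pvInb N (cn + d.1, cm + d.2) ∧ pvVGet v (cn + d.1) (cm + d.2) = false ∧
      ((pvAt area (cn + d.1) (cm + d.2) > R ∧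
          pvStepA area R N cn cm (W, v) d
            = (W ++ [(cn + d.1, cm + d.2)], pvVSet v (cn + d.1) (cm + d.2))) ∨
       (¬ pvAt area (cn + d.1) (cm + d.2) > R ∧
          pvStepA area R N cn cm (W, v) d = (W, pvVSet v (cn + d.1) (cm + d.2))))) := by
  simp only [pvStepA]
  split_ifs with hg hr
  · right
    exact ⟨⟨hg.1, hg.2.1, hg.2.2.1, hg.2.2.2.1⟩, hg.2.2.2.2, Or.inl ⟨hr, rfl⟩⟩
  · right
    exact ⟨⟨hg.1, hg.2.1, hg.2.2.1, hg.2.2.2.1⟩, hg.2.2.2.2, Or.inr ⟨hr, rfl⟩⟩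
  · left
    refine ⟨rfl, fun hin => ?_⟩
    simp only [pvInb] at hin
    simp only [pvMemA]
    by_contra hc
    exact hg ⟨hin.1, hin.2.1, hin.2.2.1, hin.2.2.2,
      by simp only [Bool.not_eq_true] at hc; exact hc⟩

lemma pv_foldA (area : List (List Int)) (R N : Int) (c : Int × Int) :
    ∀ (ds : List (Int × Int)) (W₀ : List (Int × Int)) (v₀ : List (List Bool)),
    pvShape N v₀ →
    pvShape N (ds.foldl (pvStepA area R N c.1 c.2) (W₀, v₀)).2 ∧
    (∀ p, pvInb N p → pvMemA v₀ p →
      pvMemA (ds.foldl (pvStepA area R N c.1 c.2) (W₀, v₀)).2 p) ∧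
    (∃ nw, (ds.foldl (pvStepA area R N c.1 c.2) (W₀, v₀)).1 = W₀ ++ nw ∧
      ∀ x ∈ nw, pvGood area R N x ∧ pvMemA (ds.foldl (pvStepA area R N c.1 c.2) (W₀, v₀)).2 x) ∧
    (∀ p, pvGood area R N p → pvMemA (ds.foldl (pvStepA area R N c.1 c.2) (W₀, v₀)).2 p →
      pvMemA v₀ p ∨ p ∈ (ds.foldl (pvStepA area R N c.1 c.2) (W₀, v₀)).1) ∧
    (∀ d ∈ ds, pvInb N (c.1 + d.1, c.2 + d.2) →
      pvMemA (ds.foldl (pvStepA area R N c.1 c.2) (W₀, v₀)).2 (c.1 + d.1, c.2 + d.2)) ∧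
    ((ds.foldl (pvStepA area R N c.1 c.2) (W₀, v₀)).1.length
        + pvUA N (ds.foldl (pvStepA area R N c.1 c.2) (W₀, v₀)).2
      ≤ W₀.length + pvUA N v₀) ∧
    (∀ p, pvGood area R N p → pvMemA (ds.foldl (pvStepA area R N c.1 c.2) (W₀, v₀)).2 p →
      pvMemA v₀ p ∨ p ∈ ds.map (fun d => (c.1 + d.1, c.2 + d.2))) := by
  intro ds
  induction ds with
  | nil =>
    intro W₀ v₀ hsh
    refine ⟨hsh, fun p _ h => h, ⟨[], by simp⟩, fun p _ h => Or.inl h, by simp, by simp,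
      fun p _ h => Or.inl h⟩
  | cons d ds ih =>
    intro W₀ v₀ hsh
    simp only [List.foldl_cons]
    rcases pv_stepA_cases area R N c.1 c.2 W₀ v₀ d with ⟨heq, hmem⟩ | ⟨hinb, hnew, hcase⟩
    · rw [heq]
      obtain ⟨i1, i2, i3, i4, i5, i6, i7⟩ := ih W₀ v₀ hsh
      refine ⟨i1, i2, i3, i4, ?_, i6, ?_⟩
      · intro d' hd' hin
        rcases List.mem_cons.1 hd' with rfl | hd'
        · exact i2 _ hin (hmem hin)
        · exact i5 d' hd' hin
      · intro p hp hm
        rcases i7 p hp hm with h | h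
        · exact Or.inl h
        · exact Or.inr (List.mem_cons_of_mem _ h)
    · have hq : pvInb N (c.1 + d.1, c.2 + d.2) := hinb
      have hsh1 : pvShape N (pvVSet v₀ (c.1 + d.1) (c.2 + d.2)) := pv_shape_vset hsh _ _
      have hmemiff : ∀ p, pvInb N p →
          (pvMemA (pvVSet v₀ (c.1 + d.1) (c.2 + d.2)) p ↔
            (p = (c.1 + d.1, c.2 + d.2) ∨ pvMemA v₀ p)) :=
        fun p hp => pv_memA_vset hsh hq hp
      have hmemq : pvMemA (pvVSet v₀ (c.1 + d.1) (c.2 + d.2)) (c.1 + d.1, c.2 + d.2) :=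
        (hmemiff _ hq).2 (Or.inl rfl)
      have hu : pvUA N (pvVSet v₀ (c.1 + d.1) (c.2 + d.2)) < pvUA N v₀ :=
        pv_uA_mark (q := (c.1 + d.1, c.2 + d.2)) hsh hq hnew
      rcases hcase with ⟨hr, heq⟩ | ⟨hr, heq⟩
      · rw [heq]
        obtain ⟨i1, i2, i3, i4, i5, i6, i7⟩ :=
          ih (W₀ ++ [(c.1 + d.1, c.2 + d.2)]) (pvVSet v₀ (c.1 + d.1) (c.2 + d.2)) hsh1
        have hmono1 : ∀ p, pvInb N p → pvMemA v₀ p →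
            pvMemA (pvVSet v₀ (c.1 + d.1) (c.2 + d.2)) p :=
          fun p hp hm => (hmemiff p hp).2 (Or.inr hm)
        obtain ⟨nw, hnw, hnwall⟩ := i3
        refine ⟨i1, fun p hp hm => i2 p hp (hmono1 p hp hm),
          ⟨(c.1 + d.1, c.2 + d.2) :: nw, by simpa using hnw, ?_⟩, ?_, ?_, ?_, ?_⟩
        · intro x hx
          rcases List.mem_cons.1 hx with rfl | hx
          · exact ⟨⟨hq, hr⟩, i2 _ hq hmemq⟩
          · exact hnwall x hx
        · intro p hp hm
          rcases i4 p hp hm with h | h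
          · rcases (hmemiff p hp.1).1 h with rfl | h'
            · right; rw [hnw]; simp
            · exact Or.inl h'
          · exact Or.inr h
        · intro d' hd' hin
          rcases List.mem_cons.1 hd' with rfl | hd'
          · exact i2 _ hq hmemq
          · exact i5 d' hd' hin
        · simp only [List.length_append, List.length_cons, List.length_nil] at i6 ⊢
          omega
        · intro p hp hm
          rcases i7 p hp hm with h | h
          · rcases (hmemiff p hp.1).1 h with rfl | h'
            · right; simp
            · exact Or.inl h'
          · exact Or.inr (List.mem_cons_of_mem _ h)
      · rw [heq]
        obtain ⟨i1, i2, i3, i4, i5, i6, i7⟩ :=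
          ih W₀ (pvVSet v₀ (c.1 + d.1) (c.2 + d.2)) hsh1
        have hmono1 : ∀ p, pvInb N p → pvMemA v₀ p →
            pvMemA (pvVSet v₀ (c.1 + d.1) (c.2 + d.2)) p :=
          fun p hp hm => (hmemiff p hp).2 (Or.inr hm)
        obtain ⟨nw, hnw, hnwall⟩ := i3
        refine ⟨i1, fun p hp hm => i2 p hp (hmono1 p hp hm), ⟨nw, hnw, hnwall⟩, ?_, ?_, ?_, ?_⟩
        · intro p hp hm
          rcases i4 p hp hm with h | h
          · rcases (hmemiff p hp.1).1 h with rfl | h'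
            · exact absurd hp.2 hr
            · exact Or.inl h'
          · exact Or.inr h
        · intro d' hd' hin
          rcases List.mem_cons.1 hd' with rfl | hd'
          · exact i2 _ hq hmemq
          · exact i5 d' hd' hin
        · omega
        · intro p hp hm
          rcases i7 p hp hm with h | h
          · rcases (hmemiff p hp.1).1 h with rfl | h'
            · exact absurd hp.2 hr
            · exact Or.inl h'
          · exact Or.inr (List.mem_cons_of_mem _ h)

-- ---------- the A-side while loop ----------
lemma pv_loopA (area : List (List Int)) (R N : Int) :
    ∀ (fuel : Nat) (W : List (Int × Int)) (v : List (List Bool)),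
    pvShape N v →
    (∀ w ∈ W, pvGood area R N w ∧ pvMemA v w) →
    (∀ p, pvGood area R N p → pvMemA v p → p ∉ W →
        ∀ q ∈ pvNbrs p, pvGood area R N q → pvMemA v q) →
    W.length + pvUA N v ≤ fuel →
    pvShape N (pvLoopA area R N fuel W v) ∧
    (∀ p, pvInb N p → pvMemA v p → pvMemA (pvLoopA area R N fuel W v) p) ∧
    pvClosed area R N (pvMemA (pvLoopA area R N fuel W v)) ∧
    (∀ X : Int × Int → Prop, (∀ p, pvGood area R N p → pvMemA v p → X p) →
       pvClosed area R N X →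
       ∀ p, pvGood area R N p → pvMemA (pvLoopA area R N fuel W v) p → X p) := by
  intro fuel
  induction fuel with
  | zero =>
    intro W v hsh hW hdone hfuel
    have hW0 : W = [] := List.length_eq_zero_iff.1 (by omega)
    subst hW0
    have heq : pvLoopA area R N 0 [] v = v := rfl
    rw [heq]
    exact ⟨hsh, fun p _ h => h,
      fun p hx hp q hqn hq => hdone p hp hx (List.not_mem_nil) q hqn hq,
      fun X hbase _ p hp hm => hbase p hp hm⟩
  | succ f ihf =>
    intro W v hsh hW hdone hfuel
    cases W with
    | nil =>
      have heq : pvLoopA area R N (f + 1) [] v = v := rfl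
      rw [heq]
      exact ⟨hsh, fun p _ h => h,
        fun p hx hp q hqn hq => hdone p hp hx (List.not_mem_nil) q hqn hq,
        fun X hbase _ p hp hm => hbase p hp hm⟩
    | cons c rest =>
      obtain ⟨f1, f2, f3, f4, f5, f6, f7⟩ := pv_foldA area R N c (mnA.zip mmA) rest v hsh
      set st := (mnA.zip mmA).foldl (pvStepA area R N c.1 c.2) (rest, v) with hst
      have heq : pvLoopA area R N (f + 1) (c :: rest) v = pvLoopA area R N f st.1 st.2 := rfl
      rw [heq]
      obtain ⟨nw, hnw, hnwall⟩ := f3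
      have hcgood : pvGood area R N c ∧ pvMemA v c := hW c List.mem_cons_self
      have hWs : ∀ w ∈ st.1, pvGood area R N w ∧ pvMemA st.2 w := by
        intro w hw
        rw [hnw] at hw
        rcases List.mem_append.1 hw with hw | hw
        · obtain ⟨hg, hm⟩ := hW w (List.mem_cons_of_mem _ hw)
          exact ⟨hg, f2 w hg.1 hm⟩
        · exact hnwall w hw
      have hdones : ∀ p, pvGood area R N p → pvMemA st.2 p → p ∉ st.1 →
          ∀ q ∈ pvNbrs p, pvGood area R N q → pvMemA st.2 q := by
        intro p hp hm hns q hqn hq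
        have hmv : pvMemA v p := by
          rcases f4 p hp hm with h | h
          · exact h
          · exact absurd h hns
        by_cases hpc : p = c
        · subst hpc
          rw [← pv_nbrs_eq p] at hqn
          obtain ⟨d, hd, hdq⟩ := List.mem_map.1 hqn
          rw [← hdq]
          exact f5 d hd (by rw [hdq]; exact hq.1)
        · have hnr : p ∉ rest := fun hc => hns (by rw [hnw]; exact List.mem_append.2 (Or.inl hc))
          have hnW : p ∉ c :: rest := by
            intro hc
            rcases List.mem_cons.1 hc with h | h
            · exact hpc h
            · exact hnr h
          exact f2 q hq.1 (hdone p hp hmv hnW q hqn hq)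
      have hfuels : st.1.length + pvUA N st.2 ≤ f := by
        have := hfuel
        simp only [List.length_cons] at this
        omega
      obtain ⟨l1, l2, l3, l4⟩ := ihf st.1 st.2 f1 hWs hdones hfuels
      refine ⟨l1, fun p hp hm => l2 p hp (f2 p hp hm), l3, ?_⟩
      intro X hbase hcl p hp hm
      refine l4 X ?_ hcl p hp hm
      intro p' hp' hm'
      rcases f7 p' hp' hm' with h | h
      · exact hbase p' hp' h
      · rw [pv_nbrs_eq c] at h
        exact hcl c (hbase c hcgood.1 hcgood.2) hcgood.1 p' h hp'

-- ---------- characterisation of one flood of A as reachability ----------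
lemma pv_flood_char (area : List (List Int)) (R N : Int) (v : List (List Bool))
    (hsh : pvShape N v) (c : Int × Int) (hc : pvGood area R N c)
    (hnv : pvVGet v c.1 c.2 = false)
    (hcl : pvClosed area R N (fun p => pvMemA v p)) :
    ∀ p, pvGood area R N p →
      (pvMemA (pvLoopA area R N (N.toNat * N.toNat) [c] (pvVSet v c.1 c.2)) p ↔
        pvMemA v p ∨ ReachP area R N c p) := by
  have hsh1 : pvShape N (pvVSet v c.1 c.2) := pv_shape_vset hsh _ _
  have hmemiff : ∀ p, pvInb N p →
      (pvMemA (pvVSet v c.1 c.2) p ↔ (p = c ∨ pvMemA v p)) := by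
    intro p hp
    have := pv_memA_vset (q := c) hsh hc.1 hp
    simpa using this
  have hmemc : pvMemA (pvVSet v c.1 c.2) c := (hmemiff c hc.1).2 (Or.inl rfl)
  have hW : ∀ w ∈ [c], pvGood area R N w ∧ pvMemA (pvVSet v c.1 c.2) w := by
    intro w hw; rw [List.mem_singleton.1 hw]; exact ⟨hc, hmemc⟩
  have hdone : ∀ p, pvGood area R N p → pvMemA (pvVSet v c.1 c.2) p → p ∉ [c] →
      ∀ q ∈ pvNbrs p, pvGood area R N q → pvMemA (pvVSet v c.1 c.2) q := by
    intro p hp hm hnp q hqn hq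
    have hpne : p ≠ c := fun hcq => hnp (by rw [hcq]; exact List.mem_singleton.2 rfl)
    have hmp : pvMemA v p := by
      rcases (hmemiff p hp.1).1 hm with h | h
      · exact absurd h hpne
      · exact h
    exact (hmemiff q hq.1).2 (Or.inr (hcl p hmp hp q hqn hq))
  have hfuel : [c].length + pvUA N (pvVSet v c.1 c.2) ≤ N.toNat * N.toNat := by
    have h1 : pvUA N (pvVSet v c.1 c.2) < pvUA N v := pv_uA_mark (q := c) hsh hc.1 hnv
    have h2 : pvUA N v ≤ (pvAll N).length := List.length_filter_le _ _
    rw [pv_length_all] at h2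
    simp only [List.length_cons, List.length_nil]
    omega
  obtain ⟨a1, a2, a3, a4⟩ :=
    pv_loopA area R N (N.toNat * N.toNat) [c] (pvVSet v c.1 c.2) hsh1 hW hdone hfuel
  intro p hp
  constructor
  · intro hm
    refine a4 (fun x => pvMemA v x ∨ ReachP area R N c x) ?_ ?_ p hp hm
    · intro p' hp' hm'
      rcases (hmemiff p' hp'.1).1 hm' with rfl | h
      · exact Or.inr Relation.ReflTransGen.refl
      · exact Or.inl h
    · intro p' hx' hp' q hqn hq
      rcases hx' with h | h
      · exact Or.inl (hcl p' h hp' q hqn hq)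
      · exact Or.inr (h.tail ⟨hp', hq, hqn⟩)
  · intro hm
    rcases hm with h | h
    · exact a2 p hp.1 ((hmemiff p hp.1).2 (Or.inr h))
    · induction h with
      | refl => exact a2 c hc.1 hmemc
      | tail h1 h2 ih =>
        exact a3 _ (ih h2.1) h2.1 _ h2.2.2 h2.2.1

-- ---------- symmetry of the flat reachability relation ----------
lemma pv_adjF_symm (area : List (List Int)) (R : Int) (N : Nat) {k l : Nat}
    (h : adjF area R N k l) : adjF area R N l k := by
  obtain ⟨hk, hl, hgeo⟩ := h
  exact ⟨hl, hk, by omega⟩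

lemma pv_connF_symm (area : List (List Int)) (R : Int) (N : Nat) {k l : Nat}
    (h : ConnF area R N k l) : ConnF area R N l k := by
  induction h with
  | refl => exact Relation.ReflTransGen.refl
  | tail h1 h2 ih =>
    exact Relation.ReflTransGen.trans
      (Relation.ReflTransGen.single (pv_adjF_symm area R N h2)) ih

-- ---------- arithmetic on flat encodings ----------
lemma pv_enc_div (N i j : Nat) (hj : j < N) : (i * N + j) / N = i := by
  rw [Nat.mul_comm, Nat.mul_add_div (by omega), Nat.div_eq_of_lt hj]
  omega

lemma pv_enc_mod (N i j : Nat) (hj : j < N) : (i * N + j) % N = j := by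
  rw [Nat.mul_comm, Nat.mul_add_mod, Nat.mod_eq_of_lt hj]

lemma pv_enc_lt (N i j : Nat) (hi : i < N) (hj : j < N) : i * N + j < N * N := by
  have h1 : i * N + j < (i + 1) * N := by
    simp only [Nat.add_mul, Nat.one_mul]; omega
  have h2 : (i + 1) * N ≤ N * N := Nat.mul_le_mul_right N (by omega)
  omega

lemma pv_goodP_cast (area : List (List Int)) (R : Int) (N : Nat) (i j : Nat) :
    pvGood area R (N : Int) ((i : Int), (j : Int)) ↔
      i < N ∧ j < N ∧ pvAt area (i : Int) (j : Int) > R := by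
  simp only [pvGood, pvInb]
  constructor
  · rintro ⟨⟨h1, h2, h3, h4⟩, h5⟩
    exact ⟨by exact_mod_cast h2, by exact_mod_cast h4, h5⟩
  · rintro ⟨h1, h2, h3⟩
    exact ⟨⟨by positivity, by exact_mod_cast h1, by positivity, by exact_mod_cast h2⟩, h3⟩

lemma pv_gdF_iff (area : List (List Int)) (R : Int) (N : Nat) (i j : Nat)
    (hi : i < N) (hj : j < N) :
    gdF area R N (i * N + j) ↔ pvAt area (i : Int) (j : Int) > R := by
  unfold gdF
  rw [pv_enc_div N i j hj, pv_enc_mod N i j hj]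
  exact ⟨fun h => h.2, fun h => ⟨pv_enc_lt N i j hi hj, h⟩⟩

lemma pv_gdF_good (area : List (List Int)) (R : Int) (N : Nat) (k : Nat)
    (h : gdF area R N k) : pvGood area R (N : Int) (decF N k) := by
  obtain ⟨hk, hval⟩ := h
  have hN : 0 < N := by
    rcases Nat.eq_zero_or_pos N with h0 | h0
    · subst h0; omega
    · exact h0
  have h1 : k / N < N := Nat.div_lt_of_lt_mul hk
  have h2 : k % N < N := Nat.mod_lt _ hN
  exact (pv_goodP_cast area R N (k / N) (k % N)).2 ⟨h1, h2, hval⟩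

lemma pv_good_gdF (area : List (List Int)) (R : Int) (N : Nat) (p : Int × Int)
    (h : pvGood area R (N : Int) p) : gdF area R N (encI N p) ∧ decF N (encI N p) = p := by
  obtain ⟨⟨h1, h2, h3, h4⟩, h5⟩ := h
  have hi : p.1.toNat < N := by omega
  have hj : p.2.toNat < N := by omega
  have hc1 : ((p.1.toNat : Nat) : Int) = p.1 := by omega
  have hc2 : ((p.2.toNat : Nat) : Int) = p.2 := by omega
  constructor
  · rw [show encI N p = p.1.toNat * N + p.2.toNat from rfl,
      pv_gdF_iff area R N _ _ hi hj, hc1, hc2]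
    exact h5
  · unfold decF encI
    rw [pv_enc_div N _ _ hj, pv_enc_mod N _ _ hj, hc1, hc2]

lemma pv_adjP_adjF (area : List (List Int)) (R : Int) (N : Nat) {p q : Int × Int}
    (h : adjP area R (N : Int) p q) : adjF area R N (encI N p) (encI N q) := by
  obtain ⟨hp, hq, hmem⟩ := h
  obtain ⟨hgp, _⟩ := pv_good_gdF area R N p hp
  obtain ⟨hgq, _⟩ := pv_good_gdF area R N q hq
  refine ⟨hgp, hgq, ?_⟩
  obtain ⟨⟨a1, a2, a3, a4⟩, _⟩ := hp
  obtain ⟨⟨b1, b2, b3, b4⟩, _⟩ := hq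
  cases p with
  | mk x y =>
    cases q with
    | mk z w =>
      simp only [pvNbrs, List.mem_cons, Prod.mk.injEq, List.not_mem_nil, or_false] at hmem
      simp only [encI]
      simp only at a1 a2 a3 a4 b1 b2 b3 b4 ⊢
      have a1' : (0 : Int) ≤ x := a1
      have a2' : x < (N : Int) := a2
      have a3' : (0 : Int) ≤ y := a3
      have a4' : y < (N : Int) := a4
      have b1' : (0 : Int) ≤ z := b1
      have b2' : z < (N : Int) := b2
      have b3' : (0 : Int) ≤ w := b3
      have b4' : w < (N : Int) := b4
      have hN : 0 < N := by omega
      have hxy : x.toNat < N ∧ y.toNat < N ∧ z.toNat < N ∧ w.toNat < N := by omega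
      have hmody : (x.toNat * N + y.toNat) % N = y.toNat := pv_enc_mod N _ _ (by omega)
      have hmodw : (z.toNat * N + w.toNat) % N = w.toNat := pv_enc_mod N _ _ (by omega)
      rcases hmem with ⟨hz, hw⟩ | ⟨hz, hw⟩ | ⟨hz, hw⟩ | ⟨hz, hw⟩
      · -- q = (x - 1, y): k = l + N
        right; right; right
        have hx1 : x.toNat = z.toNat + 1 := by omega
        have hx2 : x.toNat * N = z.toNat * N + N := by
          rw [hx1, Nat.add_mul, Nat.one_mul]
        show x.toNat * N + y.toNat = z.toNat * N + w.toNat + N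
        omega
      · -- q = (x + 1, y): l = k + N
        right; right; left
        have hx1 : z.toNat = x.toNat + 1 := by omega
        have hx2 : z.toNat * N = x.toNat * N + N := by
          rw [hx1, Nat.add_mul, Nat.one_mul]
        show z.toNat * N + w.toNat = x.toNat * N + y.toNat + N
        omega
      · -- q = (x, y - 1): k = l + 1
        right; left
        refine ⟨?_, by rw [hmodw]; omega⟩
        have hzx : z.toNat = x.toNat := by omega
        have hprod : z.toNat * N = x.toNat * N := by rw [hzx]
        show x.toNat * N + y.toNat = z.toNat * N + w.toNat + 1
        omega
      · -- q = (x, y + 1): l = k + 1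
        left
        refine ⟨?_, by rw [hmody]; omega⟩
        have hzx : z.toNat = x.toNat := by omega
        have hprod : z.toNat * N = x.toNat * N := by rw [hzx]
        show z.toNat * N + w.toNat = x.toNat * N + y.toNat + 1
        omega

lemma pv_adjF_adjP (area : List (List Int)) (R : Int) (N : Nat) {k l : Nat}
    (h : adjF area R N k l) : adjP area R (N : Int) (decF N k) (decF N l) := by
  obtain ⟨hk, hl, hgeo⟩ := h
  refine ⟨pv_gdF_good area R N k hk, pv_gdF_good area R N l hl, ?_⟩
  have hN : 0 < N := by
    rcases Nat.eq_zero_or_pos N with h0 | h0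
    · exfalso; have := hk.1; subst h0; omega
    · exact h0
  have hkm : k % N < N := Nat.mod_lt _ hN
  have hlm : l % N < N := Nat.mod_lt _ hN
  have hkd : (k / N) * N + k % N = k := by rw [Nat.mul_comm]; exact Nat.div_add_mod k N
  have hld : (l / N) * N + l % N = l := by rw [Nat.mul_comm]; exact Nat.div_add_mod l N
  simp only [decF, pvNbrs, List.mem_cons, Prod.mk.injEq, List.not_mem_nil, or_false]
  rcases hgeo with ⟨he, hb⟩ | ⟨he, hb⟩ | he | he
  · -- l = k + 1 within a row: decF l = (k/N, k%N + 1)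
    have h1 : l = (k / N) * N + (k % N + 1) := by omega
    have hdiv : l / N = k / N := by rw [h1, pv_enc_div N _ _ hb]
    have hmod : l % N = k % N + 1 := by rw [h1, pv_enc_mod N _ _ hb]
    right; right; right
    exact ⟨by omega, by omega⟩
  · -- k = l + 1 within a row: decF l = (k/N, k%N - 1)
    have h1 : k = (l / N) * N + (l % N + 1) := by omega
    have hdiv : k / N = l / N := by rw [h1, pv_enc_div N _ _ hb]
    have hmod : k % N = l % N + 1 := by rw [h1, pv_enc_mod N _ _ hb]
    right; right; left
    exact ⟨by omega, by omega⟩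
  · -- l = k + N: decF l = (k/N + 1, k%N)
    have hdiv : l / N = k / N + 1 := by rw [he, Nat.add_div_right _ hN]
    have hmod : l % N = k % N := by rw [he, Nat.add_mod_right]
    right; left
    exact ⟨by omega, by omega⟩
  · -- k = l + N: decF l = (k/N - 1, k%N)
    have hdiv : k / N = l / N + 1 := by rw [he, Nat.add_div_right _ hN]
    have hmod : k % N = l % N := by rw [he, Nat.add_mod_right]
    left
    exact ⟨by omega, by omega⟩

lemma pv_reach_conn (area : List (List Int)) (R : Int) (N : Nat) {p q : Int × Int}
    (h : ReachP area R (N : Int) p q) : ConnF area R N (encI N p) (encI N q) := by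
  induction h with
  | refl => exact Relation.ReflTransGen.refl
  | tail h1 h2 ih => exact ih.tail (pv_adjP_adjF area R N h2)

lemma pv_conn_reach (area : List (List Int)) (R : Int) (N : Nat) {k l : Nat}
    (h : ConnF area R N k l) : ReachP area R (N : Int) (decF N k) (decF N l) := by
  induction h with
  | refl => exact Relation.ReflTransGen.refl
  | tail h1 h2 ih => exact ih.tail (pv_adjF_adjP area R N h2)

-- ---------- union-find: find, fuel irrelevance, basic facts ----------
def ufInv (par : List Nat) : Prop := ∀ x, par.getD x x ≤ x

lemma uf_getD_set (l : List Nat) (i a j : Nat) :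
    (l.set i a).getD j j = if i = j ∧ i < l.length then a else l.getD j j := by
  simp only [List.getD_eq_getElem?_getD, List.getElem?_set]
  split_ifs with h1 h2 <;> simp_all <;> omega

lemma uf_fuel (par : List Nat) (h : ufInv par) :
    ∀ x, ∀ f, x < f → ufFindAux par f x = ufFind par x := by
  intro x
  induction x using Nat.strong_induction_on with
  | _ x ih =>
    intro f hf
    obtain ⟨f', rfl⟩ : ∃ f', f = f' + 1 := ⟨f - 1, by omega⟩
    by_cases hp : par.getD x x = x
    · show (if par.getD x x = x then x else ufFindAux par f' (par.getD x x)) = ufFind par x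
      rw [if_pos hp]
      show x = (if par.getD x x = x then x else ufFindAux par x (par.getD x x))
      rw [if_pos hp]
    · have hlt : par.getD x x < x := lt_of_le_of_ne (h x) hp
      show (if par.getD x x = x then x else ufFindAux par f' (par.getD x x)) = _
      rw [if_neg hp, ih _ hlt f' (by omega)]
      show _ = ufFindAux par (x + 1) x
      conv_rhs => rw [show (x + 1 : Nat) = x + 1 from rfl]
      show _ = (if par.getD x x = x then x else ufFindAux par x (par.getD x x))
      rw [if_neg hp, ih _ hlt x (by omega)]

lemma uf_find_root (par : List Nat) (x : Nat) (hp : par.getD x x = x) :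
    ufFind par x = x := by
  show (if par.getD x x = x then x else ufFindAux par x (par.getD x x)) = x
  rw [if_pos hp]

lemma uf_find_step (par : List Nat) (h : ufInv par) (x : Nat) (hp : par.getD x x ≠ x) :
    ufFind par x = ufFind par (par.getD x x) := by
  have hlt : par.getD x x < x := lt_of_le_of_ne (h x) hp
  show ufFindAux par (x + 1) x = _
  show (if par.getD x x = x then x else ufFindAux par x (par.getD x x)) = _
  rw [if_neg hp, uf_fuel par h _ x (by omega)]

lemma uf_find_le (par : List Nat) (h : ufInv par) : ∀ x, ufFind par x ≤ x := by
  intro x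
  induction x using Nat.strong_induction_on with
  | _ x ih =>
    by_cases hp : par.getD x x = x
    · rw [uf_find_root par x hp]
    · have hlt : par.getD x x < x := lt_of_le_of_ne (h x) hp
      rw [uf_find_step par h x hp]
      exact le_trans (ih _ hlt) (by omega)

lemma uf_find_fix (par : List Nat) (h : ufInv par) :
    ∀ x, par.getD (ufFind par x) (ufFind par x) = ufFind par x := by
  intro x
  induction x using Nat.strong_induction_on with
  | _ x ih =>
    by_cases hp : par.getD x x = x
    · rw [uf_find_root par x hp]; exact hp
    · have hlt : par.getD x x < x := lt_of_le_of_ne (h x) hp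
      rw [uf_find_step par h x hp]
      exact ih _ hlt

lemma uf_find_conn (area : List (List Int)) (R : Int) (N : Nat) (par : List Nat)
    (h : ufInv par) (hc : ∀ x, par.getD x x = x ∨ ConnF area R N x (par.getD x x)) :
    ∀ x, ufFind par x = x ∨ ConnF area R N x (ufFind par x) := by
  intro x
  induction x using Nat.strong_induction_on with
  | _ x ih =>
    by_cases hp : par.getD x x = x
    · left; exact uf_find_root par x hp
    · have hlt : par.getD x x < x := lt_of_le_of_ne (h x) hp
      have hcx : ConnF area R N x (par.getD x x) := by
        rcases hc x with h' | h'
        · exact absurd h' hp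
        · exact h'
      rw [uf_find_step par h x hp]
      rcases ih _ hlt with h' | h'
      · right; rw [h']; exact hcx
      · right; exact hcx.trans h'

-- after linking a root r under b < r, roots remap: those that were r become the root of b
lemma uf_link_inv (par : List Nat) (h : ufInv par) (r b : Nat) (hb : b < r) :
    ufInv (par.set r b) := by
  intro x
  rw [uf_getD_set]
  split_ifs with h1
  · omega
  · exact h x

lemma uf_find_set_low (par : List Nat) (h : ufInv par) (r b : Nat) (hb : b < r) :
    ∀ x, x < r → ufFind (par.set r b) x = ufFind par x := by
  have h' : ufInv (par.set r b) := uf_link_inv par h r b hb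
  intro x
  induction x using Nat.strong_induction_on with
  | _ x ih =>
    intro hxr
    have hg : (par.set r b).getD x x = par.getD x x := by
      rw [uf_getD_set]; rw [if_neg (by omega)]
    by_cases hp : par.getD x x = x
    · rw [uf_find_root par x hp, uf_find_root _ x (by rw [hg]; exact hp)]
    · have hlt : par.getD x x < x := lt_of_le_of_ne (h x) hp
      rw [uf_find_step par h x hp, uf_find_step _ h' x (by rw [hg]; exact hp), hg]
      exact ih _ hlt (by omega)

lemma uf_find_set (par : List Nat) (h : ufInv par) (r b : Nat) (hb : b < r)
    (hr : par.getD r r = r) (hrlen : r < par.length) :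
    ∀ x, ufFind (par.set r b) x = if ufFind par x = r then ufFind par b else ufFind par x := by
  have h' : ufInv (par.set r b) := uf_link_inv par h r b hb
  intro x
  induction x using Nat.strong_induction_on with
  | _ x ih =>
    by_cases hxr : x = r
    · subst hxr
      have hg : (par.set x b).getD x x = b := by
        rw [uf_getD_set]; rw [if_pos ⟨rfl, hrlen⟩]
      rw [uf_find_step _ h' x (by rw [hg]; omega), hg,
        uf_find_set_low par h x b hb b hb, uf_find_root par x hr, if_pos rfl]
    · have hg : (par.set r b).getD x x = par.getD x x := by
        rw [uf_getD_set]; rw [if_neg (by intro hc; exact hxr hc.1.symm)]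
      by_cases hp : par.getD x x = x
      · rw [uf_find_root par x hp, uf_find_root _ x (by rw [hg]; exact hp), if_neg hxr]
      · have hlt : par.getD x x < x := lt_of_le_of_ne (h x) hp
        rw [uf_find_step par h x hp, uf_find_step _ h' x (by rw [hg]; exact hp), hg]
        exact ih _ hlt

-- the invariant carried through the union pass
def ufOK (area : List (List Int)) (R : Int) (N : Nat) (par : List Nat) : Prop :=
  par.length = N * N ∧ ufInv par ∧
    (∀ x, par.getD x x = x ∨ ConnF area R N x (par.getD x x))

lemma uf_union_ok (area : List (List Int)) (R : Int) (N : Nat) (par : List Nat)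
    (hok : ufOK area R N par) (a b : Nat) (hab : ConnF area R N a b)
    (ha : a < N * N) (hb : b < N * N) :
    ufOK area R N (ufUnion par a b) ∧
    (∀ x y, ufFind par x = ufFind par y →
      ufFind (ufUnion par a b) x = ufFind (ufUnion par a b) y) ∧
    ufFind (ufUnion par a b) a = ufFind (ufUnion par a b) b := by
  obtain ⟨hlen, hinv, hconn⟩ := hok
  have hfa := uf_find_le par hinv a
  have hfb := uf_find_le par hinv b
  have hfixa := uf_find_fix par hinv a
  have hfixb := uf_find_fix par hinv b
  -- connectivity between the two roots
  have hroots : ConnF area R N (ufFind par a) (ufFind par b) := by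
    have h1 : ConnF area R N a (ufFind par a) := by
      rcases uf_find_conn area R N par hinv hconn a with h' | h'
      · rw [h']; exact Relation.ReflTransGen.refl
      · exact h'
    have h2 : ConnF area R N b (ufFind par b) := by
      rcases uf_find_conn area R N par hinv hconn b with h' | h'
      · rw [h']; exact Relation.ReflTransGen.refl
      · exact h'
    exact (pv_connF_symm area R N h1).trans (hab.trans h2)
  unfold ufUnion
  by_cases h1 : ufFind par a < ufFind par b
  · rw [if_pos h1]
    have hrb : ufFind par b < par.length := by omega
    have hset := uf_find_set par hinv (ufFind par b) (ufFind par a) h1 hfixb hrb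
    refine ⟨⟨by simp [hlen], uf_link_inv par hinv _ _ h1, ?_⟩, ?_, ?_⟩
    · intro x
      rw [uf_getD_set]
      split_ifs with hcase
      · right
        rw [← hcase.1]
        exact pv_connF_symm area R N hroots
      · exact hconn x
    · intro x y hxy
      rw [hset x, hset y, hxy]
    · rw [hset a, hset b, if_pos rfl, if_neg (by omega)]
      exact (uf_find_root par _ hfixa).symm
  · rw [if_neg h1]
    by_cases h2 : ufFind par b < ufFind par a
    · rw [if_pos h2]
      have hra : ufFind par a < par.length := by omega
      have hset := uf_find_set par hinv (ufFind par a) (ufFind par b) h2 hfixa hra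
      refine ⟨⟨by simp [hlen], uf_link_inv par hinv _ _ h2, ?_⟩, ?_, ?_⟩
      · intro x
        rw [uf_getD_set]
        split_ifs with hcase
        · right
          rw [← hcase.1]
          exact hroots
        · exact hconn x
      · intro x y hxy
        rw [hset x, hset y, hxy]
      · rw [hset a, hset b, if_pos rfl, if_neg (by omega)]
        exact uf_find_root par _ hfixb
    · rw [if_neg h2]
      exact ⟨⟨hlen, hinv, hconn⟩, fun x y hxy => hxy, by omega⟩

-- folding a list of edges (each between good, connected, in-range cells)
lemma uf_fold_edges (area : List (List Int)) (R : Int) (N : Nat) :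
    ∀ (E : List (Nat × Nat)) (par : List Nat), ufOK area R N par →
    (∀ e ∈ E, ConnF area R N e.1 e.2 ∧ e.1 < N * N ∧ e.2 < N * N) →
    ufOK area R N (E.foldl (fun par e => ufUnion par e.1 e.2) par) ∧
    (∀ x y, ufFind par x = ufFind par y →
      ufFind (E.foldl (fun par e => ufUnion par e.1 e.2) par) x
        = ufFind (E.foldl (fun par e => ufUnion par e.1 e.2) par) y) ∧
    (∀ e ∈ E, ufFind (E.foldl (fun par e => ufUnion par e.1 e.2) par) e.1
        = ufFind (E.foldl (fun par e => ufUnion par e.1 e.2) par) e.2) := by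
  intro E
  induction E with
  | nil => exact fun par hok _ => ⟨hok, fun x y h => h, by simp⟩
  | cons e E ih =>
    intro par hok hE
    have he := hE e List.mem_cons_self
    have hE' : ∀ e' ∈ E, ConnF area R N e'.1 e'.2 ∧ e'.1 < N * N ∧ e'.2 < N * N :=
      fun e' he' => hE e' (List.mem_cons_of_mem _ he')
    obtain ⟨hok1, hpres1, heq1⟩ := uf_union_ok area R N par hok e.1 e.2 he.1 he.2.1 he.2.2
    obtain ⟨hok2, hpres2, heq2⟩ := ih (ufUnion par e.1 e.2) hok1 hE'
    simp only [List.foldl_cons]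
    exact ⟨hok2, fun x y h => hpres2 x y (hpres1 x y h),
      fun e' he' => by
        rcases List.mem_cons.1 he' with rfl | he''
        · exact hpres2 _ _ heq1
        · exact heq2 e' he''⟩

-- ---------- the edge list of B's union pass ----------
def ufCellEdges (area : List (List Int)) (R : Int) (N : Nat) (i j : Nat) : List (Nat × Nat) :=
  if pvAt area (i : Int) (j : Int) > R then
    (if j + 1 < N ∧ pvAt area (i : Int) ((j + 1 : Nat) : Int) > R
      then [(i * N + j, i * N + j + 1)] else []) ++
    (if i + 1 < N ∧ pvAt area ((i + 1 : Nat) : Int) (j : Int) > R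
      then [(i * N + j, i * N + j + N)] else [])
  else []

def ufEdges (area : List (List Int)) (R : Int) (N : Nat) : List (Nat × Nat) :=
  ((List.range N).flatMap (fun i => (List.range N).map (fun j => (i, j)))).flatMap
    (fun s => ufCellEdges area R N s.1 s.2)

lemma uf_cell_eq_fold (area : List (List Int)) (R : Int) (N : Nat) (par : List Nat) (i j : Nat) :
    ufCell area R N par i j
      = (ufCellEdges area R N i j).foldl (fun par e => ufUnion par e.1 e.2) par := by
  unfold ufCell ufCellEdges
  split_ifs with h1 h2 h3 h3 <;> simp [List.foldl]

lemma uf_pass_eq_fold (area : List (List Int)) (R : Int) (N : Nat) :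
    ufPass area R N
      = (ufEdges area R N).foldl (fun par e => ufUnion par e.1 e.2) (List.range (N * N)) := by
  unfold ufPass ufEdges
  rw [List.foldl_flatMap, List.foldl_flatMap]
  apply PySem.List.foldl_congr_mem
  intro par i _
  rw [List.foldl_map]
  apply PySem.List.foldl_congr_mem
  intro par' j _
  exact uf_cell_eq_fold area R N par' i j

lemma uf_edges_sound (area : List (List Int)) (R : Int) (N : Nat) :
    ∀ e ∈ ufEdges area R N, adjF area R N e.1 e.2 := by
  intro e he
  simp only [ufEdges, List.mem_flatMap, List.mem_map, List.mem_range] at he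
  obtain ⟨s, ⟨i, hi, j, hj, rfl⟩, hmem⟩ := he
  simp only [ufCellEdges] at hmem
  have hER : j + 1 < N → pvAt area (i : Int) ((j + 1 : Nat) : Int) > R →
      pvAt area (i : Int) (j : Int) > R → adjF area R N (i * N + j) (i * N + j + 1) := by
    intro hb hg2 hg1
    refine ⟨(pv_gdF_iff area R N i j hi hj).2 hg1, ?_, ?_⟩
    · rw [show i * N + j + 1 = i * N + (j + 1) from rfl, pv_gdF_iff area R N i (j + 1) hi hb]
      exact hg2
    · left
      exact ⟨rfl, by rw [pv_enc_mod N i j hj]; exact hb⟩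
  have hED : i + 1 < N → pvAt area ((i + 1 : Nat) : Int) (j : Int) > R →
      pvAt area (i : Int) (j : Int) > R → adjF area R N (i * N + j) (i * N + j + N) := by
    intro hb hg2 hg1
    refine ⟨(pv_gdF_iff area R N i j hi hj).2 hg1, ?_, ?_⟩
    · rw [show i * N + j + N = (i + 1) * N + j by ring, pv_gdF_iff area R N (i + 1) j hb hj]
      exact hg2
    · right; right; left; rfl
  split_ifs at hmem with h1 h2 h3 h3
  · simp only [List.mem_append, List.mem_cons, List.not_mem_nil, or_false] at hmem
    rcases hmem with rfl | rfl
    · exact hER h2.1 h2.2 h1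
    · exact hED h3.1 h3.2 h1
  · simp only [List.append_nil, List.mem_cons, List.not_mem_nil, or_false] at hmem
    subst hmem
    exact hER h2.1 h2.2 h1
  · simp only [List.nil_append, List.mem_cons, List.not_mem_nil, or_false] at hmem
    subst hmem
    exact hED h3.1 h3.2 h1
  · simp at hmem
  · simp at hmem

lemma uf_edges_complete (area : List (List Int)) (R : Int) (N : Nat) :
    ∀ k l, adjF area R N k l →
      (k, l) ∈ ufEdges area R N ∨ (l, k) ∈ ufEdges area R N := by
  have hmain : ∀ k l, adjF area R N k l →
      (l = k + 1 ∧ k % N + 1 < N ∨ l = k + N) → (k, l) ∈ ufEdges area R N := by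
    intro k l h hor
    obtain ⟨hk, hl, _⟩ := h
    have hN : 0 < N := by
      rcases Nat.eq_zero_or_pos N with h0 | h0
      · exfalso; have := hk.1; subst h0; omega
      · exact h0
    set i := k / N with hidef
    set j := k % N with hjdef
    have hkd : i * N + j = k := by rw [Nat.mul_comm]; exact Nat.div_add_mod k N
    have hi : i < N := Nat.div_lt_of_lt_mul hk.1
    have hj : j < N := Nat.mod_lt _ hN
    have hmemS : (i, j) ∈ (List.range N).flatMap
        (fun i => (List.range N).map (fun j => (i, j))) := by
      simp only [List.mem_flatMap, List.mem_map, List.mem_range]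
      exact ⟨i, hi, j, hj, rfl⟩
    have hgk : pvAt area (i : Int) (j : Int) > R := by
      rw [← pv_gdF_iff area R N i j hi hj, hkd]; exact hk
    apply List.mem_flatMap.2
    refine ⟨(i, j), hmemS, ?_⟩
    simp only [ufCellEdges, if_pos hgk]
    rcases hor with ⟨hlk, hb⟩ | hlk
    · have hjb : j + 1 < N := by rw [hjdef]; exact hb
      have hgl : pvAt area (i : Int) ((j + 1 : Nat) : Int) > R := by
        rw [← pv_gdF_iff area R N i (j + 1) hi hjb,
          show i * N + (j + 1) = k + 1 by omega, ← hlk]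
        exact hl
      apply List.mem_append.2
      left
      rw [if_pos ⟨hjb, hgl⟩, hkd]
      simp [hlk]
    · have hib : i + 1 < N := by
        by_contra hc
        have : l = (i + 1) * N + j := by rw [hlk, ← hkd]; ring
        have : l ≥ N * N := by
          have h1 : N * N ≤ (i + 1) * N := Nat.mul_le_mul_right N (by omega)
          omega
        exact absurd hl.1 (by omega)
      have hgl : pvAt area ((i + 1 : Nat) : Int) (j : Int) > R := by
        rw [← pv_gdF_iff area R N (i + 1) j hib hj,
          show (i + 1) * N + j = k + N by rw [← hkd]; ring, ← hlk]
        exact hl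
      apply List.mem_append.2
      right
      rw [if_pos ⟨hib, hgl⟩, hkd]
      simp [hlk]
  intro k l h
  obtain ⟨hk, hl, hgeo⟩ := h
  rcases hgeo with h' | h' | h' | h'
  · exact Or.inl (hmain k l ⟨hk, hl, by tauto⟩ (Or.inl h'))
  · exact Or.inr (hmain l k ⟨hl, hk, by tauto⟩ (Or.inl h'))
  · exact Or.inl (hmain k l ⟨hk, hl, by tauto⟩ (Or.inr h'))
  · exact Or.inr (hmain l k ⟨hl, hk, by tauto⟩ (Or.inr h'))

-- initial parent list(range(M)) is trivially OK
lemma uf_init_ok (area : List (List Int)) (R : Int) (N : Nat) :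
    ufOK area R N (List.range (N * N)) := by
  have hg : ∀ x, (List.range (N * N)).getD x x = x := by
    intro x
    by_cases hx : x < N * N
    · rw [List.getD_eq_getElem _ _ (by simpa using hx)]
      simp
    · rw [List.getD_eq_default _ _ (by simpa using hx)]
  exact ⟨by simp, fun x => le_of_eq (hg x), fun x => Or.inl (hg x)⟩

-- the final parent of the pass: roots characterise connectivity
lemma uf_pass_char (area : List (List Int)) (R : Int) (N : Nat) :
    ufOK area R N (ufPass area R N) ∧
    (∀ k l, ConnF area R N k l → ufFind (ufPass area R N) k = ufFind (ufPass area R N) l) ∧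
    (∀ k, ufFind (ufPass area R N) k = k ∨ ConnF area R N k (ufFind (ufPass area R N) k)) := by
  rw [uf_pass_eq_fold]
  have hE : ∀ e ∈ ufEdges area R N, ConnF area R N e.1 e.2 ∧ e.1 < N * N ∧ e.2 < N * N := by
    intro e he
    have h := uf_edges_sound area R N e he
    exact ⟨Relation.ReflTransGen.single h, h.1.1, h.2.1.1⟩
  obtain ⟨hok, hpres, hedge⟩ :=
    uf_fold_edges area R N (ufEdges area R N) (List.range (N * N)) (uf_init_ok area R N) hE
  refine ⟨hok, ?_, uf_find_conn area R N _ hok.2.1 hok.2.2⟩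
  intro k l hconn
  induction hconn with
  | refl => rfl
  | tail h1 h2 ih =>
    rw [ih]
    rcases uf_edges_complete area R N _ _ h2 with hm | hm
    · exact hedge _ hm
    · exact (hedge _ hm).symm

-- root = self iff no smaller connected cell
lemma uf_root_iff (area : List (List Int)) (R : Int) (N : Nat) (k : Nat) :
    (ufFind (ufPass area R N) k = k ↔ ¬ ∃ l, l < k ∧ ConnF area R N l k) := by
  obtain ⟨hok, hconn_eq, hconn_root⟩ := uf_pass_char area R N
  constructor
  · rintro hroot ⟨l, hlk, hconn⟩
    have h1 : ufFind (ufPass area R N) l = ufFind (ufPass area R N) k := hconn_eq l k hconn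
    have h2 : ufFind (ufPass area R N) l ≤ l := uf_find_le _ hok.2.1 l
    omega
  · intro hno
    by_contra hne
    have hle : ufFind (ufPass area R N) k ≤ k := uf_find_le _ hok.2.1 k
    have hlt : ufFind (ufPass area R N) k < k := lt_of_le_of_ne hle hne
    rcases hconn_root k with h' | h'
    · exact hne h'
    · exact hno ⟨ufFind (ufPass area R N) k, hlt, pv_connF_symm area R N h'⟩

-- ---------- the coupled scan ----------
-- the cells processed strictly before (i, j) in A's scan order
def pvBefore (i j : Nat) (s : Nat × Nat) : Prop := s.1 < i ∨ (s.1 = i ∧ s.2 < j)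

def pvAInv (area : List (List Int)) (R : Int) (N : Nat) (P : Nat × Nat → Prop)
    (st : Int × List (List Bool)) : Prop :=
  pvShape (N : Int) st.2 ∧
  ∀ p, pvGood area R (N : Int) p →
    (pvMemA st.2 p ↔ ∃ s : Nat × Nat, P s ∧ pvGood area R (N : Int) ((s.1 : Int), (s.2 : Int)) ∧
      ReachP area R (N : Int) ((s.1 : Int), (s.2 : Int)) p)

-- generic indexed fold over List.range
lemma pv_foldl_range_ind {σ : Type} (n : Nat) (f : σ → Nat → σ) (Q : Nat → σ → Prop)
    (s0 : σ) (h0 : Q 0 s0) (hs : ∀ i s, i < n → Q i s → Q (i + 1) (f s i)) :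
    Q n ((List.range n).foldl f s0) := by
  induction n with
  | zero => simpa using h0
  | succ n ih =>
    rw [List.range_succ, List.foldl_append]
    have hsn : ∀ i s, i < n → Q i s → Q (i + 1) (f s i) := fun i s hi => hs i s (by omega)
    exact hs n _ (by omega) (ih hsn)
  
-- the bridge: "some earlier good cell reaches (i,j)" = "some smaller flat index is connected"
lemma pv_before_conn (area : List (List Int)) (R : Int) (N : Nat) (i j : Nat)
    (hi : i < N) (hj : j < N) (hgood : pvGood area R (N : Int) ((i : Int), (j : Int))) :
    ((∃ s : Nat × Nat, pvBefore i j s ∧ pvGood area R (N : Int) ((s.1 : Int), (s.2 : Int)) ∧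
        ReachP area R (N : Int) ((s.1 : Int), (s.2 : Int)) ((i : Int), (j : Int))) ↔
      ∃ l, l < i * N + j ∧ ConnF area R N l (i * N + j)) := by
  have henc : encI N ((i : Int), (j : Int)) = i * N + j := by
    simp [encI]
  constructor
  · rintro ⟨s, hbef, hgs, hreach⟩
    have hconn := pv_reach_conn area R N hreach
    rw [henc] at hconn
    have hencs : encI N ((s.1 : Int), (s.2 : Int)) = s.1 * N + s.2 := by simp [encI]
    rw [hencs] at hconn
    refine ⟨s.1 * N + s.2, ?_, hconn⟩
    have hs2 : s.2 < N := ((pv_goodP_cast area R N s.1 s.2).1 hgs).2.1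
    rcases hbef with h' | ⟨h1, h2⟩
    · have : (s.1 + 1) * N ≤ i * N := Nat.mul_le_mul_right N (by omega)
      have : s.1 * N + N ≤ i * N := by
        rw [show s.1 * N + N = (s.1 + 1) * N by ring]; exact this
      omega
    · rw [h1]; omega
  · rintro ⟨l, hlk, hconn⟩
    have hne : l ≠ i * N + j := by omega
    have hgl : gdF area R N l := by
      rcases hconn.cases_head with h' | ⟨c, hadj, _⟩
      · exact absurd h' hne
      · exact hadj.1
    have hN : 0 < N := by omega
    refine ⟨(l / N, l % N), ?_, ?_, ?_⟩
    · have hlm : l % N < N := Nat.mod_lt _ hN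
      have hld : (l / N) * N + l % N = l := by rw [Nat.mul_comm]; exact Nat.div_add_mod l N
      unfold pvBefore
      simp only
      by_cases hcase : l / N < i
      · left; exact hcase
      · right
        have hge : i ≤ l / N := by omega
        have : l / N = i := by
          by_contra hc
          have h1 : i + 1 ≤ l / N := by omega
          have h2 : (i + 1) * N ≤ (l / N) * N := Nat.mul_le_mul_right N h1
          have : i * N + N ≤ (l / N) * N := by
            rw [show i * N + N = (i + 1) * N by ring]; exact h2
          omega
        constructor
        · exact this
        · rw [this] at hld; omega
    · exact (show pvGood area R (N : Int) (decF N l) from pv_gdF_good area R N l hgl)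
    · have hreach := pv_conn_reach area R N hconn
      have hdk : decF N (i * N + j) = ((i : Int), (j : Int)) := by
        unfold decF
        rw [pv_enc_div N i j hj, pv_enc_mod N i j hj]
      rw [hdk] at hreach
      exact hreach

-- B's per-cell counting predicate agrees with A's branch condition
lemma pv_inner_step (area : List (List Int)) (R : Int) (N : Nat)
    (i j : Nat) (hi : i < N) (hj : j < N)
    (st : Int × List (List Bool)) (hinv : pvAInv area R N (pvBefore i j) st) :
    pvAInv area R N (pvBefore i (j + 1)) (pvInnerA area R (N : Int) (i : Int) st (j : Int)) ∧
    (pvInnerA area R (N : Int) (i : Int) st (j : Int)).1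
      = st.1 + (if pvAt area (i : Int) (j : Int) > R ∧
          ufFind (ufPass area R N) (i * N + j) = i * N + j then 1 else 0) := by
  obtain ⟨hsh, hchar⟩ := hinv
  have hcl : pvClosed area R (N : Int) (fun p => pvMemA st.2 p) := by
    intro p hx hp q hqn hq
    rw [hchar q hq]
    obtain ⟨s, hbef, hgs, hreach⟩ := (hchar p hp).1 hx
    exact ⟨s, hbef, hgs, hreach.tail ⟨hp, hq, hqn⟩⟩
  by_cases hg : pvAt area (i : Int) (j : Int) > R
  · have hgood : pvGood area R (N : Int) ((i : Int), (j : Int)) :=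
      (pv_goodP_cast area R N i j).2 ⟨hi, hj, hg⟩
    have hbridge := pv_before_conn area R N i j hi hj hgood
    have hroot := uf_root_iff area R N (i * N + j)
    by_cases hv : pvMemA st.2 ((i : Int), (j : Int))
    · -- already visited: A skips; B's root test fails
      have hex : ∃ l, l < i * N + j ∧ ConnF area R N l (i * N + j) :=
        hbridge.1 ((hchar _ hgood).1 hv)
      have hnroot : ¬ ufFind (ufPass area R N) (i * N + j) = i * N + j :=
        fun hr => (hroot.1 hr) hex
      have hskip : pvInnerA area R (N : Int) (i : Int) st (j : Int) = st := by
        unfold pvInnerA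
        rw [if_neg]
        intro ⟨h1, _⟩
        rw [show pvVGet st.2 (i : Int) (j : Int)
            = pvVGet st.2 ((i : Int), (j : Int)).1 ((i : Int), (j : Int)).2 from rfl] at h1
        exact absurd h1 (by simpa [pvMemA] using hv)
      rw [hskip]
      refine ⟨⟨hsh, ?_⟩, by rw [if_neg (fun hc => hnroot hc.2)]; ring⟩
      intro p hp
      rw [hchar p hp]
      constructor
      · rintro ⟨s, hbef, hgs, hreach⟩
        exact ⟨s, Or.elim hbef (fun h' => Or.inl h') (fun h' => Or.inr ⟨h'.1, by omega⟩),
          hgs, hreach⟩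
      · rintro ⟨s, hbef, hgs, hreach⟩
        rcases hbef with h' | ⟨h1, h2⟩
        · exact ⟨s, Or.inl h', hgs, hreach⟩
        · by_cases hsij : s.2 = j
          · -- s = (i, j): reroute through the cell that already visited (i, j)
            obtain ⟨s', hbef', hgs', hreach'⟩ := (hchar _ hgood).1 hv
            have hseq : ((s.1 : Int), (s.2 : Int)) = ((i : Int), (j : Int)) := by
              rw [h1, hsij]
            rw [hseq] at hreach
            exact ⟨s', hbef', hgs', hreach'.trans hreach⟩
          · exact ⟨s, Or.inr ⟨h1, by omega⟩, hgs, hreach⟩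
    · -- not visited: A counts and floods; B's root test succeeds
      have hnex : ¬ ∃ l, l < i * N + j ∧ ConnF area R N l (i * N + j) := by
        intro hex
        exact hv ((hchar _ hgood).2 (hbridge.2 hex))
      have hroot' : ufFind (ufPass area R N) (i * N + j) = i * N + j := hroot.2 hnex
      have hvfalse : pvVGet st.2 (i : Int) (j : Int) = false := by
        cases hb : pvVGet st.2 (i : Int) (j : Int)
        · rfl
        · exact absurd (show pvMemA st.2 ((i : Int), (j : Int)) from hb) hv
      have htake : pvInnerA area R (N : Int) (i : Int) st (j : Int)
          = (st.1 + 1, pvLoopA area R (N : Int) ((N : Int).toNat * (N : Int).toNat)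
              [((i : Int), (j : Int))] (pvVSet st.2 (i : Int) (j : Int))) := by
        unfold pvInnerA
        rw [if_pos ⟨hvfalse, hg⟩]
      rw [htake]
      have hflood := pv_flood_char area R (N : Int) st.2 hsh ((i : Int), (j : Int))
        hgood hvfalse hcl
      refine ⟨⟨?_, ?_⟩, by rw [if_pos ⟨hg, hroot'⟩]⟩
      · -- shape of the flood result
        have hsh1 : pvShape (N : Int) (pvVSet st.2 (i : Int) (j : Int)) := pv_shape_vset hsh _ _
        have hmemc : pvMemA (pvVSet st.2 (i : Int) (j : Int)) ((i : Int), (j : Int)) := by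
          have := pv_memA_vset (q := ((i : Int), (j : Int))) hsh hgood.1 hgood.1
          exact this.2 (Or.inl rfl)
        have hW : ∀ w ∈ [((i : Int), (j : Int))], pvGood area R (N : Int) w ∧
            pvMemA (pvVSet st.2 (i : Int) (j : Int)) w := by
          intro w hw; rw [List.mem_singleton.1 hw]; exact ⟨hgood, hmemc⟩
        have hdone : ∀ p, pvGood area R (N : Int) p →
            pvMemA (pvVSet st.2 (i : Int) (j : Int)) p → p ∉ [((i : Int), (j : Int))] →
            ∀ q ∈ pvNbrs p, pvGood area R (N : Int) q →
            pvMemA (pvVSet st.2 (i : Int) (j : Int)) q := by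
          intro p hp hm hnp q hqn hq
          have hpne : p ≠ ((i : Int), (j : Int)) :=
            fun hcq => hnp (by rw [hcq]; exact List.mem_singleton.2 rfl)
          have hmp : pvMemA st.2 p := by
            have := pv_memA_vset (q := ((i : Int), (j : Int))) hsh hgood.1 hp.1
            rcases this.1 hm with h' | h'
            · exact absurd h' hpne
            · exact h'
          have := pv_memA_vset (q := ((i : Int), (j : Int))) hsh hgood.1 hq.1
          exact this.2 (Or.inr (hcl p hmp hp q hqn hq))
        have hfuel : [((i : Int), (j : Int))].length
            + pvUA (N : Int) (pvVSet st.2 (i : Int) (j : Int))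
            ≤ (N : Int).toNat * (N : Int).toNat := by
          have h1 : pvUA (N : Int) (pvVSet st.2 (i : Int) (j : Int)) < pvUA (N : Int) st.2 :=
            pv_uA_mark (q := ((i : Int), (j : Int))) hsh hgood.1 hvfalse
          have h2 : pvUA (N : Int) st.2 ≤ (pvAll (N : Int)).length := List.length_filter_le _ _
          rw [pv_length_all] at h2
          simp only [List.length_cons, List.length_nil]
          omega
        exact (pv_loopA area R (N : Int) ((N : Int).toNat * (N : Int).toNat)
          [((i : Int), (j : Int))] (pvVSet st.2 (i : Int) (j : Int)) hsh1 hW hdone hfuel).1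
      · intro p hp
        rw [hflood p hp, hchar p hp]
        constructor
        · rintro (⟨s, hbef, hgs, hreach⟩ | hreach)
          · exact ⟨s, Or.elim hbef (fun h' => Or.inl h') (fun h' => Or.inr ⟨h'.1, by omega⟩),
              hgs, hreach⟩
          · exact ⟨(i, j), Or.inr ⟨rfl, by omega⟩, hgood, hreach⟩
        · rintro ⟨s, hbef, hgs, hreach⟩
          rcases hbef with h' | ⟨h1, h2⟩
          · exact Or.inl ⟨s, Or.inl h', hgs, hreach⟩
          · by_cases hsij : s.2 = j
            · right
              have hseq : ((s.1 : Int), (s.2 : Int)) = ((i : Int), (j : Int)) := by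
                rw [h1, hsij]
              rw [hseq] at hreach
              exact hreach
            · exact Or.inl ⟨s, Or.inr ⟨h1, by omega⟩, hgs, hreach⟩
  · -- cell not above threshold: both sides skip
    have hskip : pvInnerA area R (N : Int) (i : Int) st (j : Int) = st := by
      unfold pvInnerA
      rw [if_neg (fun hc => hg hc.2)]
    rw [hskip]
    refine ⟨⟨hsh, ?_⟩, by rw [if_neg (fun hc => hg hc.1)]; ring⟩
    intro p hp
    rw [hchar p hp]
    have hnotgood : ¬ pvGood area R (N : Int) ((i : Int), (j : Int)) := by
      intro hc
      exact hg ((pv_goodP_cast area R N i j).1 hc).2.2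
    constructor
    · rintro ⟨s, hbef, hgs, hreach⟩
      exact ⟨s, Or.elim hbef (fun h' => Or.inl h') (fun h' => Or.inr ⟨h'.1, by omega⟩),
        hgs, hreach⟩
    · rintro ⟨s, hbef, hgs, hreach⟩
      rcases hbef with h' | ⟨h1, h2⟩
      · exact ⟨s, Or.inl h', hgs, hreach⟩
      · by_cases hsij : s.2 = j
        · exact absurd (by rw [← h1, ← hsij]; exact hgs) hnotgood
        · exact ⟨s, Or.inr ⟨h1, by omega⟩, hgs, hreach⟩

-- transfer of the scan invariant along an equivalent prefix predicate
lemma pv_ainv_iff (area : List (List Int)) (R : Int) (N : Nat)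
    (P P' : Nat × Nat → Prop)
    (h : ∀ s : Nat × Nat, pvGood area R (N : Int) ((s.1 : Int), (s.2 : Int)) → (P s ↔ P' s))
    (st : Int × List (List Bool)) :
    pvAInv area R N P st → pvAInv area R N P' st := by
  rintro ⟨hsh, hchar⟩
  refine ⟨hsh, fun p hp => ?_⟩
  rw [hchar p hp]
  constructor
  · rintro ⟨s, h1, h2, h3⟩
    exact ⟨s, (h s h2).1 h1, h2, h3⟩
  · rintro ⟨s, h1, h2, h3⟩
    exact ⟨s, (h s h2).2 h1, h2, h3⟩

lemma pv_range_cast (n : Nat) :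
    PySem.List.pyRange 0 (n : Int) 1 = (List.range n).map (fun (k : Nat) => (k : Int)) := by
  rw [PySem.List.pyRange_one]
  simp

-- ===== VERDICT (by name: the statement is the Claim_ definition above) =====
theorem bfs_spec : Claim_equal_bfs := by
  intro area R _hdom _hpre
  unfold Spec_bfs bfs bfs_alt
  set n := area.length with hn
  simp only [pv_range_cast n, List.foldl_map]
  set pf := ufPass area R n with hpf
  -- paired outer fold
  have hmain : ∀ st0 : (Int × List (List Bool)) × Int,
      pvAInv area R n (pvBefore 0 0) st0.1 → st0.1.1 = st0.2 →
      (pvAInv area R n (pvBefore n 0)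
        ((List.range n).foldl (fun st (i : Nat) => pvOuterA area R (n : Int) st (i : Int)) st0.1) ∧
      ((List.range n).foldl (fun st (i : Nat) => pvOuterA area R (n : Int) st (i : Int)) st0.1).1
        = (List.range n).foldl (fun (c : Int) (i : Nat) => (List.range n).foldl
            (fun (c : Int) (j : Nat) =>
              if pvAt area (i : Int) (j : Int) > R ∧ ufFind pf (i * n + j) = i * n + j
              then c + 1 else c) c) st0.2) := by
    intro st0 hinv0 hcnt0
    have hpaired := pv_foldl_range_ind n
      (fun (s : (Int × List (List Bool)) × Int) (i : Nat) =>
        (pvOuterA area R (n : Int) s.1 (i : Int),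
         (List.range n).foldl
            (fun (c : Int) (j : Nat) =>
              if pvAt area (i : Int) (j : Int) > R ∧ ufFind pf (i * n + j) = i * n + j
              then c + 1 else c) s.2))
      (fun i s => pvAInv area R n (pvBefore i 0) s.1 ∧ s.1.1 = s.2)
      st0 ⟨hinv0, hcnt0⟩ ?_
    · dsimp only at hpaired
      rw [PySem.List.foldl_prod_mk
          (f := fun st (i : Nat) => pvOuterA area R (n : Int) st (i : Int))
          (g := fun (c : Int) (i : Nat) => (List.range n).foldl
            (fun (c : Int) (j : Nat) =>
              if pvAt area (i : Int) (j : Int) > R ∧ ufFind pf (i * n + j) = i * n + j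
              then c + 1 else c) c)] at hpaired
      cases st0 with
      | mk a b => exact hpaired
    · -- one outer step: row i
      intro i s hi hQ
      obtain ⟨hinv, hcnt⟩ := hQ
      dsimp only
      unfold pvOuterA
      rw [pv_range_cast n, List.foldl_map]
      have hinner := pv_foldl_range_ind n
        (fun (t : (Int × List (List Bool)) × Int) (j : Nat) =>
          (pvInnerA area R (n : Int) (i : Int) t.1 (j : Int),
           if pvAt area (i : Int) (j : Int) > R ∧ ufFind pf (i * n + j) = i * n + j
             then t.2 + 1 else t.2))
        (fun j t => pvAInv area R n (pvBefore i j) t.1 ∧ t.1.1 = t.2)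
        s ⟨pv_ainv_iff area R n _ _ (fun s' _ => by unfold pvBefore; omega) s.1 hinv, hcnt⟩ ?_
      · dsimp only at hinner
        rw [PySem.List.foldl_prod_mk
            (f := fun st (j : Nat) => pvInnerA area R (n : Int) (i : Int) st (j : Int))
            (g := fun (c : Int) (j : Nat) =>
              if pvAt area (i : Int) (j : Int) > R ∧ ufFind pf (i * n + j) = i * n + j
              then c + 1 else c)] at hinner
        obtain ⟨hinv', hcnt'⟩ := hinner
        refine ⟨?_, ?_⟩
        · refine pv_ainv_iff area R n _ _ ?_ _ hinv'
          intro s' hg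
          have hb : s'.2 < n := ((pv_goodP_cast area R n s'.1 s'.2).1 hg).2.1
          unfold pvBefore
          omega
        · cases s with
          | mk a b => exact hcnt'
      · intro j t hj hQ'
        obtain ⟨hinvt, hcntt⟩ := hQ'
        dsimp only
        obtain ⟨hinv2, hcnt2⟩ := pv_inner_step area R n i j hi hj t.1 hinvt
        refine ⟨hinv2, ?_⟩
        rw [hcnt2, hcntt]
        split_ifs <;> ring
  have h0 : pvAInv area R n (pvBefore 0 0)
      (0, List.replicate n (List.replicate n false)) := by
    constructor
    · constructor
      · simp
      · intro row hrow
        rw [List.eq_of_mem_replicate hrow]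
        simp
    · intro p _
      constructor
      · intro hm
        exact absurd hm (by simp [pvMemA, pv_vget_replicate])
      · rintro ⟨s, hbef, _, _⟩
        unfold pvBefore at hbef
        omega
  exact (hmain ((0, List.replicate n (List.replicate n false)), 0) h0 rfl).2
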